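-- pv_equiv track=rewrite | github.com/PetrPrazak/AdventOfCode | 2016/Day01/day1.py | get_all_new_pos
-- ===== SOURCE A (Python) =====
-- def get_all_new_pos(pos, direction, steps):
--     x, y = pos
--
--     positions = list()
--     for step in range(1,steps+1):
--         if direction == 0:
--             y += 1
--         elif direction == 1:
--             x += 1
--         elif direction == 2:
--             y -= 1
--         else: # dir 3
--             x -= 1
--         positions.append((x,y))
--     return positions
-- ===== SOURCE B (Python) =====
-- def get_all_new_pos(pos, direction, steps):
--     # Build the moving coordinate as a literal range and pair it with the
--     # constant coordinate via zip -- no per-step accumulation or index math.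
--     x, y = pos
--     n = max(steps, 0)
--     if direction == 0:
--         return list(zip([x] * n, range(y + 1, y + n + 1)))
--     if direction == 1:
--         return list(zip(range(x + 1, x + n + 1), [y] * n))
--     if direction == 2:
--         return list(zip([x] * n, range(y - 1, y - n - 1, -1)))
--     return list(zip(range(x - 1, x - n - 1, -1), [y] * n))
-- ===== Notes on version B (the rewrite author's own statement) =====
-- stated objective: alternative
-- what changed: B builds the result without any loop over steps: per direction it materialises the moving coordinate as a literal range object (ascending or descending) and zips it with a replicated constant coordinate, instead of A's single pass that accumulates the position step by step.
import Mathlib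
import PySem

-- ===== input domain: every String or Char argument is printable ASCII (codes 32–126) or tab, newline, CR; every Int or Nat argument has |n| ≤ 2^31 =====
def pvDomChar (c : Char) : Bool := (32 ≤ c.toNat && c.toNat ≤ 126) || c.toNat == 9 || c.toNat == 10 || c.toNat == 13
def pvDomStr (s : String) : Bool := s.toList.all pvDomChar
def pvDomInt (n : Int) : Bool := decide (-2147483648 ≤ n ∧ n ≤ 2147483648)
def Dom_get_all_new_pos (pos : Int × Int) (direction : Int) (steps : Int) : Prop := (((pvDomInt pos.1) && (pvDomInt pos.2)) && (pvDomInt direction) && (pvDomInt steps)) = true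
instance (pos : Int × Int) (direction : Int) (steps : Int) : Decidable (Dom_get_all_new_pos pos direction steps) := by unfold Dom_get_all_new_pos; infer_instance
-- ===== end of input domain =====

-- B builds the result with no loop over steps at all: per direction the moving coordinate is a
-- literal range (ascending or descending) zipped with a replicated constant coordinate; objective: alternative.

-- ===== PORT A =====
def get_all_new_pos (pos : Int × Int) (direction : Int) (steps : Int) : List (Int × Int) :=
  let x := pos.1
  let y := pos.2
  -- positions = list(); for step in range(1, steps+1): …; positions.append((x,y))
  let st := (PySem.List.pyRange 1 (steps + 1) 1).foldl
    (fun (s : Int × Int × List (Int × Int)) (_step : Int) =>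
      let nxy : Int × Int :=
        if direction == 0 then (s.1, s.2.1 + 1)
        else if direction == 1 then (s.1 + 1, s.2.1)
        else if direction == 2 then (s.1, s.2.1 - 1)
        else (s.1 - 1, s.2.1)  -- dir 3
      (nxy.1, nxy.2, s.2.2 ++ [(nxy.1, nxy.2)]))
    (x, y, [])
  st.2.2

-- ===== PORT B =====
def get_all_new_pos_alt (pos : Int × Int) (direction : Int) (steps : Int) : List (Int × Int) :=
  let x := pos.1
  let y := pos.2
  let n := max steps 0
  -- list(zip([c]*n, range(...))) per direction; [c]*n = List.replicate, range = PySem.List.pyRange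
  if direction == 0 then (List.replicate n.toNat x).zip (PySem.List.pyRange (y + 1) (y + n + 1) 1)
  else if direction == 1 then (PySem.List.pyRange (x + 1) (x + n + 1) 1).zip (List.replicate n.toNat y)
  else if direction == 2 then (List.replicate n.toNat x).zip (PySem.List.pyRange (y - 1) (y - n - 1) (-1))
  else (PySem.List.pyRange (x - 1) (x - n - 1) (-1)).zip (List.replicate n.toNat y)

-- ===== PRECONDITION & SPEC =====
def Spec_get_all_new_pos (pos : Int × Int) (direction : Int) (steps : Int) (out : List (Int × Int)) : Prop := out = get_all_new_pos_alt pos direction steps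
instance (pos : Int × Int) (direction : Int) (steps : Int) (out : List (Int × Int)) : Decidable (Spec_get_all_new_pos pos direction steps out) := by unfold Spec_get_all_new_pos; infer_instance

-- ===== CLAIM (what is proved, stated in full; the proofs are below) =====
def Claim_equal_get_all_new_pos : Prop := ∀ (pos : Int × Int) (direction : Int) (steps : Int), Dom_get_all_new_pos pos direction steps → Spec_get_all_new_pos pos direction steps (get_all_new_pos pos direction steps)

-- ===== LEMMAS AND PROOFS =====

-- A's loop with a fixed delta (dx,dy): the accumulating fold over any list equals
-- the closed-form map by step index.
theorem foldA_closed (dx dy : Int) (l : List Int) : ∀ (x y : Int) (acc : List (Int × Int)),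
    l.foldl (fun (s : Int × Int × List (Int × Int)) (_ : Int) =>
        (s.1 + dx, s.2.1 + dy, s.2.2 ++ [(s.1 + dx, s.2.1 + dy)])) (x, y, acc)
    = (x + l.length * dx, y + l.length * dy,
       acc ++ (List.range l.length).map (fun (k : Nat) => (x + ((k : Int) + 1) * dx, y + ((k : Int) + 1) * dy))) := by
  induction l with
  | nil => intro x y acc; simp
  | cons a l ih =>
      intro x y acc
      rw [List.foldl_cons, ih, List.length_cons, List.range_succ_eq_map, List.map_cons,
        List.map_map, List.append_assoc, List.singleton_append]
      simp only [Prod.mk.injEq]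
      refine ⟨by push_cast; ring, by push_cast; ring, ?_⟩
      congr 1
      refine List.cons_eq_cons.mpr ⟨by norm_num, ?_⟩
      apply List.map_congr_left
      intro k _
      simp only [Function.comp_apply, Nat.succ_eq_add_one, Prod.mk.injEq]
      constructor <;> push_cast <;> ring

-- A's whole body with a fixed delta, as the closed-form map over step indices.
theorem A_closed (pos : Int × Int) (direction steps : Int) (dx dy : Int)
    (h : ∀ s : Int × Int × List (Int × Int),
      (if direction == 0 then (s.1, s.2.1 + 1)
       else if direction == 1 then (s.1 + 1, s.2.1)
       else if direction == 2 then (s.1, s.2.1 - 1)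
       else (s.1 - 1, s.2.1)) = (s.1 + dx, s.2.1 + dy)) :
    get_all_new_pos pos direction steps
      = (List.range steps.toNat).map
          (fun (k : Nat) => (pos.1 + ((k : Int) + 1) * dx, pos.2 + ((k : Int) + 1) * dy)) := by
  unfold get_all_new_pos
  have hstep : (fun (s : Int × Int × List (Int × Int)) (_ : Int) =>
      let nxy : Int × Int :=
        if direction == 0 then (s.1, s.2.1 + 1)
        else if direction == 1 then (s.1 + 1, s.2.1)
        else if direction == 2 then (s.1, s.2.1 - 1)
        else (s.1 - 1, s.2.1)
      (nxy.1, nxy.2, s.2.2 ++ [(nxy.1, nxy.2)]))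
    = (fun (s : Int × Int × List (Int × Int)) (_ : Int) =>
        (s.1 + dx, s.2.1 + dy, s.2.2 ++ [(s.1 + dx, s.2.1 + dy)])) := by
    funext s i
    have := h s
    simp only [this]
  simp only [hstep, foldA_closed, List.nil_append, PySem.List.pyRange_one, List.length_map,
    List.length_range]
  congr 2
  omega

-- zip of a replicated constant with a map over List.range, as one map.
theorem zip_replicate_map_left (n : Nat) (c : Int) (f : Nat → Int) :
    (List.replicate n c).zip ((List.range n).map f)
      = (List.range n).map (fun k => (c, f k)) := by
  apply List.ext_getElem
  · simp [List.length_zip]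
  · intro k h1 h2
    simp [List.getElem_zip]

theorem zip_replicate_map_right (n : Nat) (c : Int) (f : Nat → Int) :
    ((List.range n).map f).zip (List.replicate n c)
      = (List.range n).map (fun k => (f k, c)) := by
  apply List.ext_getElem
  · simp [List.length_zip]
  · intro k h1 h2
    simp [List.getElem_zip]

-- ===== VERDICT (by name: the statement is the Claim_ definition above) =====
theorem get_all_new_pos_spec : Claim_equal_get_all_new_pos := by
  intro pos direction steps _
  unfold Spec_get_all_new_pos get_all_new_pos_alt
  have hn : (max steps 0).toNat = steps.toNat := by omega
  by_cases h0 : direction == 0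
  · rw [A_closed pos direction steps 0 1 (fun s => by simp [h0])]
    simp only [h0, if_pos]
    rw [PySem.List.pyRange_one]
    have hlen : (pos.2 + max steps 0 + 1 - (pos.2 + 1)).toNat = steps.toNat := by omega
    rw [hlen, hn, zip_replicate_map_left steps.toNat pos.1 (fun k => pos.2 + 1 + (k : Int))]
    apply List.map_congr_left
    intro k _
    exact Prod.ext (by push_cast; ring) (by push_cast; ring)
  · by_cases h1 : direction == 1
    · rw [A_closed pos direction steps 1 0 (fun s => by simp [h0, h1])]
      simp only [h0, h1, if_neg, if_pos, Bool.false_eq_true, not_false_iff]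
      rw [PySem.List.pyRange_one]
      have hlen : (pos.1 + max steps 0 + 1 - (pos.1 + 1)).toNat = steps.toNat := by omega
      rw [hlen, hn, zip_replicate_map_right steps.toNat pos.2 (fun k => pos.1 + 1 + (k : Int))]
      apply List.map_congr_left
      intro k _
      exact Prod.ext (by push_cast; ring) (by push_cast; ring)
    · by_cases h2 : direction == 2
      · rw [A_closed pos direction steps 0 (-1) (fun s => by simp [h0, h1, h2]; ring)]
        simp only [h0, h1, h2, if_neg, if_pos, Bool.false_eq_true, not_false_iff]
        rw [PySem.List.pyRange_neg_one]
        have hlen : (pos.2 - 1 - (pos.2 - max steps 0 - 1)).toNat = steps.toNat := by omega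
        rw [hlen, hn, zip_replicate_map_left steps.toNat pos.1 (fun k => pos.2 - 1 - (k : Int))]
        apply List.map_congr_left
        intro k _
        exact Prod.ext (by push_cast; ring) (by push_cast; ring)
      · rw [A_closed pos direction steps (-1) 0 (fun s => by simp [h0, h1, h2]; ring)]
        simp only [h0, h1, h2, if_neg, Bool.false_eq_true, not_false_iff]
        rw [PySem.List.pyRange_neg_one]
        have hlen : (pos.1 - 1 - (pos.1 - max steps 0 - 1)).toNat = steps.toNat := by omega
        rw [hlen, hn, zip_replicate_map_right steps.toNat pos.2 (fun k => pos.1 - 1 - (k : Int))]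
        apply List.map_congr_left
        intro k _
        exact Prod.ext (by push_cast; ring) (by push_cast; ring)
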